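-- pv_equiv track=rewrite | github.com/gamaievsky/DescripteursHarmoniques | enumeration.py | Interval_Reduction
-- ===== SOURCE A (Python) =====
-- def Interval_Reduction(ListeAccords, M = 12):
--     ListeAccordsIntMod = []
--     ListeAccordsMod = [[round((a+[M])[i+1] - (a+[M])[i], 2) for i in range(len(a))] for a in ListeAccords]
--     for a in ListeAccordsMod:
--         a.sort()
--         if a not in ListeAccordsIntMod:
--             ListeAccordsIntMod.append(a)
--     ListeAccordsInt = [[sum(([0]+a)[:i]) for i in range (1,len(a)+1)] for a in ListeAccordsIntMod]
--     return ListeAccordsInt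
-- ===== SOURCE B (Python) =====
-- def Interval_Reduction(ListeAccords, M = 12):
--     seen = set()
--     result = []
--     for a in ListeAccords:
--         ext = a + [M]
--         ivs = sorted(round(ext[i+1] - ext[i], 2) for i in range(len(a)))
--         key = tuple(ivs)
--         if key in seen:
--             continue
--         seen.add(key)
--         chord = []
--         total = 0
--         for d in ivs:
--             chord.append(total)
--             total += d
--         result.append(chord)
--     return result
-- ===== Notes on version B (the rewrite author's own statement) =====
-- stated objective: faster
-- what changed: One pass over the chords with a hash-set of interval tuples for dedup and a running accumulator for the prefix sums, replacing A's three separate passes, O(k) list-membership dedup and repeated sum(([0]+a)[:i]) prefix recomputation.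
import Mathlib
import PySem

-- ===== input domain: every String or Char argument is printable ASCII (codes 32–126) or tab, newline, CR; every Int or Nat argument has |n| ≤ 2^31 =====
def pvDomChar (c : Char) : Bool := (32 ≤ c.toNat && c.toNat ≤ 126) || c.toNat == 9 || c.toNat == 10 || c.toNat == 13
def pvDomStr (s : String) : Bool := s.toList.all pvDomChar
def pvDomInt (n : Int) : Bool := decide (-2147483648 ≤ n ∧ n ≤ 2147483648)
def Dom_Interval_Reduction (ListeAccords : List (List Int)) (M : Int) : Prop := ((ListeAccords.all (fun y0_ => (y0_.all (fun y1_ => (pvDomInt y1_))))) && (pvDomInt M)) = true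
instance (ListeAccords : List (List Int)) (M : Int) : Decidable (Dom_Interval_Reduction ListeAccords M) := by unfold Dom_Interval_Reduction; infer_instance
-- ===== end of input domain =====

-- B replaces A's three passes (intervals, list-membership dedup, quadratic prefix-sum recomputation)
-- by one accumulator-driven pass with a set-based dedup; objective: faster (constant-factor/pass structure).


-- ===== PORT A =====
-- round(x, 2) on an int difference is the identity; (a+[M])[i] for i in range(len a) and i+1 is
-- always in range, so pyGetD with default 0 is exact here.
def Interval_Reduction (ListeAccords : List (List Int)) (M : Int) : List (List Int) :=
  let ListeAccordsMod : List (List Int) := ListeAccords.map (fun a =>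
    (PySem.List.pyRange 0 a.length 1).map (fun i =>
      PySem.List.pyGetD (a ++ [M]) (i + 1) 0 - PySem.List.pyGetD (a ++ [M]) i 0))
  let ListeAccordsIntMod : List (List Int) := ListeAccordsMod.foldl (fun acc a =>
    let a2 := PySem.List.sorted a (fun x => x) false
    if a2 ∈ acc then acc else acc ++ [a2]) []
  ListeAccordsIntMod.map (fun a =>
    (PySem.List.pyRange 1 ((a.length : Int) + 1) 1).map (fun i =>
      (PySem.List.slice ((0 : Int) :: a) none (some i)).sum))

-- ===== PORT B =====
-- single pass; seen is a Python set of interval tuples (here PySem.Set (List Int));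
-- the inner accumulator fold is Source B's 'total'/'chord' loop.
def Interval_Reduction_alt (ListeAccords : List (List Int)) (M : Int) : List (List Int) :=
  (ListeAccords.foldl (fun (st : PySem.Set (List Int) × List (List Int)) a =>
    let ext := a ++ [M]
    let ivs := PySem.List.sorted ((PySem.List.pyRange 0 a.length 1).map (fun i =>
        PySem.List.pyGetD ext (i + 1) 0 - PySem.List.pyGetD ext i 0)) (fun x => x) false
    if PySem.Set.contains st.1 ivs then st
    else (PySem.Set.add st.1 ivs,
      st.2 ++ [(ivs.foldl (fun (p : Int × List Int) d => (p.1 + d, p.2 ++ [p.1])) (0, [])).2]))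
    (PySem.Set.empty, [])).2

-- ===== PRECONDITION & SPEC =====
def Spec_Interval_Reduction (ListeAccords : List (List Int)) (M : Int) (out : List (List Int)) : Prop := out = Interval_Reduction_alt ListeAccords M
instance (ListeAccords : List (List Int)) (M : Int) (out : List (List Int)) : Decidable (Spec_Interval_Reduction ListeAccords M out) := by unfold Spec_Interval_Reduction; infer_instance

-- ===== CLAIM (what is proved, stated in full; the proofs are below) =====
def Claim_equal_Interval_Reduction : Prop := ∀ (ListeAccords : List (List Int)) (M : Int), Dom_Interval_Reduction ListeAccords M → Spec_Interval_Reduction ListeAccords M (Interval_Reduction ListeAccords M)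

-- ===== LEMMAS AND PROOFS =====

-- prefix sums with running total t (the common value of A's slice sums and B's accumulator)
def pvPrefixes (t : Int) : List Int → List Int
  | [] => []
  | d :: ds => t :: pvPrefixes (t + d) ds

-- B's accumulator loop computes pvPrefixes
theorem pvAccum_eq (a : List Int) : ∀ (t : Int) (q : List Int),
    (a.foldl (fun (p : Int × List Int) d => (p.1 + d, p.2 ++ [p.1])) (t, q)).2 = q ++ pvPrefixes t a := by
  induction a with
  | nil => intro t q; simp [pvPrefixes]
  | cons d ds ih => intro t q; simp [List.foldl_cons, ih, pvPrefixes]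

theorem pvRangeTake_eq (a : List Int) : ∀ (t : Int),
    (List.range a.length).map (fun k => t + (a.take k).sum) = pvPrefixes t a := by
  induction a with
  | nil => intro t; simp [pvPrefixes]
  | cons d ds ih =>
    intro t
    rw [List.length_cons, List.range_succ_eq_map, List.map_cons, List.map_map]
    simp only [pvPrefixes, List.take_zero, List.sum_nil, add_zero]
    congr 1
    rw [← ih (t + d)]
    apply List.map_congr_left
    intro k _
    simp [List.take_succ_cons, add_assoc]

-- A's slice-sum comprehension computes pvPrefixes 0
theorem pvSliceSum_eq (a : List Int) :
    (PySem.List.pyRange 1 ((a.length : Int) + 1) 1).map (fun i =>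
      (PySem.List.slice ((0 : Int) :: a) none (some i)).sum) = pvPrefixes 0 a := by
  rw [PySem.List.pyRange_one]
  have h : ((a.length : Int) + 1 - 1).toNat = a.length := by omega
  rw [h, List.map_map, ← pvRangeTake_eq a 0]
  apply List.map_congr_left
  intro k _
  have h2 : (1 : Int) + (k : Int) = ((k + 1 : Nat) : Int) := by push_cast; ring
  simp only [Function.comp, h2, PySem.List.slice_to_natCast]
  simp [List.take_succ_cons]

-- the common per-chord key: sorted circular intervals
def pvIvs (M : Int) (a : List Int) : List Int :=
  PySem.List.sorted ((PySem.List.pyRange 0 a.length 1).map (fun i =>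
    PySem.List.pyGetD (a ++ [M]) (i + 1) 0 - PySem.List.pyGetD (a ++ [M]) i 0)) (fun x => x) false

-- dedup invariant: B's (set, out) fold tracks A's list fold mapped through g
theorem pvDedup_inv (f g : List Int → List Int) (ys : List (List Int)) :
    ∀ (s dl : List (List Int)), (∀ x, x ∈ s ↔ x ∈ dl) →
    (ys.foldl (fun (st : PySem.Set (List Int) × List (List Int)) a =>
        if PySem.Set.contains st.1 (f a) then st
        else (PySem.Set.add st.1 (f a), st.2 ++ [g (f a)])) (s, dl.map g)).2
      = (ys.foldl (fun acc a => if f a ∈ acc then acc else acc ++ [f a]) dl).map g := by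
  induction ys with
  | nil => intro s dl _; simp
  | cons y ys ih =>
    intro s dl hmem
    simp only [List.foldl_cons]
    by_cases hy : f y ∈ dl
    · have hc : PySem.Set.contains s (f y) = true := by
        rw [PySem.Set.contains_iff]; exact (hmem (f y)).mpr hy
      rw [if_pos hc, if_pos hy]
      exact ih s dl hmem
    · have hc : ¬ (PySem.Set.contains s (f y) = true) := by
        rw [PySem.Set.contains_iff]; exact fun h => hy ((hmem (f y)).mp h)
      rw [if_neg hc, if_neg hy]
      have hmap : (dl.map g) ++ [g (f y)] = (dl ++ [f y]).map g := by simp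
      rw [hmap]
      apply ih
      intro x
      rw [PySem.Set.mem_add, List.mem_append, hmem x]
      simp

-- ===== VERDICT (by name: the statement is the Claim_ definition above) =====
theorem Interval_Reduction_spec : Claim_equal_Interval_Reduction := by
  intro L M _
  unfold Spec_Interval_Reduction Interval_Reduction Interval_Reduction_alt
  calc
    (((L.map (fun a =>
        (PySem.List.pyRange 0 a.length 1).map (fun i =>
          PySem.List.pyGetD (a ++ [M]) (i + 1) 0 - PySem.List.pyGetD (a ++ [M]) i 0))).foldl
        (fun acc a =>
          let a2 := PySem.List.sorted a (fun x => x) false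
          if a2 ∈ acc then acc else acc ++ [a2]) []).map (fun a =>
      (PySem.List.pyRange 1 ((a.length : Int) + 1) 1).map (fun i =>
        (PySem.List.slice ((0 : Int) :: a) none (some i)).sum)))
      = ((L.foldl (fun acc a => if pvIvs M a ∈ acc then acc else acc ++ [pvIvs M a]) []).map
          (fun a => (PySem.List.pyRange 1 ((a.length : Int) + 1) 1).map (fun i =>
            (PySem.List.slice ((0 : Int) :: a) none (some i)).sum))) := by
        rw [List.foldl_map]; rfl
    _ = ((L.foldl (fun acc a => if pvIvs M a ∈ acc then acc else acc ++ [pvIvs M a]) []).map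
          (fun y => pvPrefixes 0 y)) :=
        List.map_congr_left (fun y _ => pvSliceSum_eq y)
    _ = ((L.foldl (fun acc a => if pvIvs M a ∈ acc then acc else acc ++ [pvIvs M a]) []).map
          (fun y => (y.foldl (fun (p : Int × List Int) d => (p.1 + d, p.2 ++ [p.1])) (0, [])).2)) :=
        (List.map_congr_left (fun y _ => pvAccum_eq y 0 [])).symm.trans (by simp)
    _ = (L.foldl (fun (st : PySem.Set (List Int) × List (List Int)) a =>
          let ext := a ++ [M]
          let ivs := PySem.List.sorted ((PySem.List.pyRange 0 a.length 1).map (fun i =>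
              PySem.List.pyGetD ext (i + 1) 0 - PySem.List.pyGetD ext i 0)) (fun x => x) false
          if PySem.Set.contains st.1 ivs then st
          else (PySem.Set.add st.1 ivs,
            st.2 ++ [(ivs.foldl (fun (p : Int × List Int) d => (p.1 + d, p.2 ++ [p.1])) (0, [])).2]))
          (PySem.Set.empty, [])).2 :=
        (pvDedup_inv (pvIvs M)
          (fun y => (y.foldl (fun (p : Int × List Int) d => (p.1 + d, p.2 ++ [p.1])) (0, [])).2)
          L [] [] (by simp)).symm
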